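-- pv_equiv track=rewrite | github.com/kartAI/Atlas | backend/mcp_servers/db_server.py | _skip_single_quoted_literal
-- ===== SOURCE A (Python) =====
-- def _skip_single_quoted_literal(sql: str, start: int) -> int:
--     i = start + 1
--     while i < len(sql):
--         if sql[i] == "'":
--             if i + 1 < len(sql) and sql[i + 1] == "'":
--                 i += 2
--                 continue
--             return i + 1
--         i += 1
--     return len(sql)
-- ===== SOURCE B (Python) =====
-- def _skip_single_quoted_literal(sql: str, start: int) -> int:
--     n = len(sql)
--     i = start + 1
--     while True:
--         j = sql.find("'", i)
--         if j == -1: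
--             return n
--         if j + 1 < n and sql[j + 1] == "'":
--             i = j + 2
--         else:
--             return j + 1
-- ===== Notes on version B (the rewrite author's own statement) =====
-- stated objective: faster
-- what changed: The character-by-character index loop is replaced by a loop of str.find calls that jump directly to the next quote, stepping over doubled-quote escapes.
-- outside the precondition, e.g. on _skip_single_quoted_literal("'a", -3): A returns -1, B returns 1; on _skip_single_quoted_literal('ab', -3): A returns 2, B returns 2
import Mathlib
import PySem

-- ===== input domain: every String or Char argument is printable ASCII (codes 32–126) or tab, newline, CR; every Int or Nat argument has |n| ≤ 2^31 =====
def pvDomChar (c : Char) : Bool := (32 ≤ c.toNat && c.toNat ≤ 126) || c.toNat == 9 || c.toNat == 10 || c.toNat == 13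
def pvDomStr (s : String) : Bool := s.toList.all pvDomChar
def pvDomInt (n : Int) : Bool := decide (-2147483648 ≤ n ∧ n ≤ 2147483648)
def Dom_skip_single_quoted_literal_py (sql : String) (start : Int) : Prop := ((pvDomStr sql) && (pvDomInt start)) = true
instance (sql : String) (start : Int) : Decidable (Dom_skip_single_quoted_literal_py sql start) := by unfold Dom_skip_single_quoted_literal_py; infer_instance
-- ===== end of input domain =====

-- B replaces A's character-by-character index loop with a loop of str.find calls that jump
-- to the next quote (timed faster by a constant factor; return-value equivalence, no mutation).

-- ===== PORT A =====
-- A's while loop: i scans one character at a time from start+1.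
-- The 'none => 0' arm is Python's IndexError (sql[i] out of range); excluded by Pre_.
def pvALoop (cs : List Char) (i : Int) : Int :=
  if _h : i < (cs.length : Int) then
    match PySem.List.pyGet? cs i with
    | none => 0
    | some c =>
      if c = '\'' then
        if i + 1 < (cs.length : Int) ∧ PySem.List.pyGet? cs (i + 1) = some '\'' then
          pvALoop cs (i + 2)
        else i + 1
      else pvALoop cs (i + 1)
  else (cs.length : Int)
termination_by ((cs.length : Int) - i).toNat
decreasing_by all_goals omega

def skip_single_quoted_literal_py (sql : String) (start : Int) : Int :=
  pvALoop sql.toList (start + 1)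

-- ===== PORT B =====
-- used by pvBLoop's termination proof: a found index is ≥ 0 and ≥ i - 1
theorem pv_findFrom_lb (cs sub : List Char) (i : Int)
    (h : PySem.Chars.findFrom cs sub i ≠ -1) :
    0 ≤ PySem.Chars.findFrom cs sub i ∧ i - 1 ≤ PySem.Chars.findFrom cs sub i := by
  simp only [PySem.Chars.findFrom] at h ⊢
  set st : Int := (if i < 0 then if i + (cs.length : Int) < 0 then 0 else i + (cs.length : Int) else i) with hst
  have hst0 : 0 ≤ st ∧ i - 1 ≤ st := by rw [hst]; split_ifs <;> omega
  have hr := PySem.Chars.neg_one_le_find (List.drop st.toNat (List.take ((cs.length : Int)).toNat cs)) sub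
  split_ifs at h ⊢ <;> omega

-- B's loop: jump with find to the next quote; skip doubled quotes.
def pvBLoop (cs : List Char) (i : Int) : Int :=
  let j := PySem.Chars.findFrom cs ['\''] i
  if _h1 : j = -1 then (cs.length : Int)
  else if _h2 : j + 1 < (cs.length : Int) ∧ PySem.List.pyGet? cs (j + 1) = some '\'' then
    pvBLoop cs (j + 2)
  else j + 1
termination_by ((cs.length : Int) + 1 - i).toNat
decreasing_by
  have := pv_findFrom_lb cs ['\''] i _h1
  omega

def skip_single_quoted_literal_py_alt (sql : String) (start : Int) : Int :=
  pvBLoop sql.toList (start + 1)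

-- ===== PRECONDITION & SPEC =====
-- Pre_ excludes start < -1: there A either raises IndexError (start+1 < -len) or scans the string
-- through Python's negative-index wraparound — a corner no caller would specify (start is the index
-- of the opening quote), on which A's wrapped result and B's clamped-find result are both accidental.
def Pre_skip_single_quoted_literal_py (_sql : String) (start : Int) : Prop :=
  0 ≤ start + 1
instance (sql : String) (start : Int) : Decidable (Pre_skip_single_quoted_literal_py sql start) := by
  unfold Pre_skip_single_quoted_literal_py; infer_instance

def pvWitness_skip_single_quoted_literal_py : String × Int := ("'ab''c' x", 0)

def Spec_skip_single_quoted_literal_py (sql : String) (start : Int) (out : Int) : Prop :=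
  out = skip_single_quoted_literal_py_alt sql start
instance (sql : String) (start : Int) (out : Int) : Decidable (Spec_skip_single_quoted_literal_py sql start out) := by
  unfold Spec_skip_single_quoted_literal_py; infer_instance

-- ===== CLAIM =====
def Claim_equal_skip_single_quoted_literal_py : Prop := ∀ (sql : String) (start : Int), Dom_skip_single_quoted_literal_py sql start → Pre_skip_single_quoted_literal_py sql start → Spec_skip_single_quoted_literal_py sql start (skip_single_quoted_literal_py sql start)
-- ===== LEMMAS AND PROOFS =====

-- [q] is a prefix of cs.drop m  ↔  m < len ∧ cs[m] = q
theorem pv_singleton_prefix_drop (cs : List Char) (q : Char) (m : Nat) :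
    [q] <+: cs.drop m ↔ ∃ h : m < cs.length, cs[m] = q := by
  by_cases hm : m < cs.length
  · rw [List.drop_eq_getElem_cons hm]
    constructor
    · intro h
      rcases (List.cons_prefix_cons.mp h) with ⟨h1, _⟩
      exact ⟨hm, h1.symm⟩
    · rintro ⟨_, h⟩
      exact List.cons_prefix_cons.mpr ⟨h.symm, List.nil_prefix⟩
  · rw [List.drop_eq_nil_of_le (by omega)]
    simp [hm]

theorem pv_singleton_infix (q : Char) (l : List Char) : [q] <:+: l ↔ q ∈ l := by
  constructor
  · intro h; exact h.subset (List.mem_singleton_self q)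
  · intro h
    rcases List.append_of_mem h with ⟨s, t, rfl⟩
    exact ⟨s, t, by simp⟩

-- i ≥ len: findFrom finds nothing
theorem pv_findFrom_ge_len (cs : List Char) (q : Char) (i : Int) (hi : (cs.length : Int) ≤ i) :
    PySem.Chars.findFrom cs [q] i = -1 := by
  simp only [PySem.Chars.findFrom]
  set st : Int := (if i < 0 then if i + (cs.length : Int) < 0 then 0 else i + (cs.length : Int) else i) with hst
  have hsti : st = i := by rw [hst]; split_ifs <;> omega
  have hnil : List.drop st.toNat (List.take ((cs.length : Int)).toNat cs) = [] :=
    List.drop_eq_nil_of_le (by simp; omega)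
  have hr : PySem.Chars.find (List.drop st.toNat (List.take ((cs.length : Int)).toNat cs)) [q] = -1 := by
    rw [hnil, PySem.Chars.find_eq_neg_one_iff]
    intro hinf
    simpa using (pv_singleton_infix q []).mp hinf
  split_ifs with h1
  · rfl
  · rfl

-- the characterisation of findFrom at a nonnegative in-range index
theorem pv_findFrom_first (cs : List Char) (q : Char) (k : Nat) (hk : k ≤ cs.length) :
    (PySem.Chars.findFrom cs [q] (k : Int) = -1 ↔ q ∉ cs.drop k) ∧
    (PySem.Chars.findFrom cs [q] (k : Int) ≠ -1 →
      (k : Int) ≤ PySem.Chars.findFrom cs [q] (k : Int) ∧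
      [q] <+: cs.drop (PySem.Chars.findFrom cs [q] (k : Int)).toNat ∧
      ∀ m : Nat, k ≤ m → m < (PySem.Chars.findFrom cs [q] (k : Int)).toNat → ¬ [q] <+: cs.drop m) := by
  constructor
  · rw [PySem.Chars.findFrom_natCast_eq_neg_one_iff cs [q] k hk, pv_singleton_infix]
  · exact PySem.Chars.findFrom_natCast_spec cs [q] k hk

-- unfolding equation for pvBLoop with the let and the dependent ifs reduced
theorem pvBLoop_eq (cs : List Char) (i : Int) :
    pvBLoop cs i =
      if PySem.Chars.findFrom cs ['\''] i = -1 then (cs.length : Int)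
      else if PySem.Chars.findFrom cs ['\''] i + 1 < (cs.length : Int) ∧
              PySem.List.pyGet? cs (PySem.Chars.findFrom cs ['\''] i + 1) = some '\'' then
        pvBLoop cs (PySem.Chars.findFrom cs ['\''] i + 2)
      else PySem.Chars.findFrom cs ['\''] i + 1 := by
  rw [pvBLoop]
  split_ifs <;> rfl

-- main lemma: from any nonnegative index the two loops agree
theorem pv_AB (cs : List Char) :
    ∀ (d : Nat) (i : Int), ((cs.length : Int) - i).toNat ≤ d → 0 ≤ i →
      pvALoop cs i = pvBLoop cs i := by
  intro d
  induction d with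
  | zero =>
    intro i hd hi
    have hge : (cs.length : Int) ≤ i := by omega
    rw [pvALoop, dif_neg (by omega), pvBLoop_eq,
      if_pos (pv_findFrom_ge_len cs '\'' i hge)]
  | succ d ih =>
    intro i hd hi
    by_cases hlt : i < (cs.length : Int)
    · -- in range: i = ↑k
      obtain ⟨k, rfl⟩ : ∃ k : Nat, i = (k : Int) := ⟨i.toNat, by omega⟩
      have hk : k < cs.length := by exact_mod_cast hlt
      have hchar := pv_findFrom_first cs '\'' k (by omega)
      by_cases hkq : cs[k] = '\''
      · -- cs[k] is a quote: findFrom returns k, the branches of the two loops coincide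
        have hpre : [('\'' : Char)] <+: cs.drop k := (pv_singleton_prefix_drop cs '\'' k).mpr ⟨hk, hkq⟩
        have hjne : PySem.Chars.findFrom cs ['\''] (k : Int) ≠ -1 := by
          intro h
          exact (hchar.1.mp h) (hpre.subset (List.mem_singleton_self _))
        obtain ⟨hle, hpre', hmin⟩ := hchar.2 hjne
        have hj0 : (0 : Int) ≤ PySem.Chars.findFrom cs ['\''] (k : Int) := by omega
        have hjk : PySem.Chars.findFrom cs ['\''] (k : Int) = (k : Int) := by
          by_contra hne
          exact hmin k le_rfl (by omega) hpre
        have hget : PySem.List.pyGet? cs (k : Int) = some '\'' := by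
          rw [PySem.List.pyGet?_eq_some_getElem cs (by omega) hlt]
          simp only [Int.toNat_natCast]
          rw [hkq]
        rw [pvALoop, dif_pos hlt, hget, pvBLoop_eq, hjk]
        split_ifs with h1 h2 <;>
          first
            | rfl
            | exact ih ((k : Int) + 2) (by omega) (by omega)
            | omega
            | simp_all
      · -- cs[k] is not a quote: A steps to k+1 and B's findFrom is unchanged
        have hget : PySem.List.pyGet? cs (k : Int) = some cs[k] := by
          rw [PySem.List.pyGet?_eq_some_getElem cs (by omega) hlt]
          simp only [Int.toNat_natCast]
        have hnpre : ¬ [('\'' : Char)] <+: cs.drop k := by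
          rw [pv_singleton_prefix_drop]
          rintro ⟨_, h⟩
          exact hkq h
        rw [pvALoop, dif_pos hlt, hget]
        simp only [if_neg hkq]
        rw [ih ((k : Int) + 1) (by omega) (by omega)]
        have hchar' := pv_findFrom_first cs '\'' (k + 1) (by omega)
        push_cast at hchar'
        have hjj : PySem.Chars.findFrom cs ['\''] (k : Int)
            = PySem.Chars.findFrom cs ['\''] ((k : Int) + 1) := by
          by_cases hjne : PySem.Chars.findFrom cs ['\''] (k : Int) = -1
          · -- no quote at index ≥ k, hence none at ≥ k+1 either
            have hnot : '\'' ∉ cs.drop k := hchar.1.mp hjne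
            have hnot' : '\'' ∉ cs.drop (k + 1) := by
              rw [List.drop_eq_getElem_cons hk] at hnot
              intro h
              exact hnot (List.mem_cons_of_mem _ h)
            rw [hjne]
            exact ((hchar'.1).mpr hnot').symm
          · obtain ⟨hle, hpre, hmin⟩ := hchar.2 hjne
            have hj0 : (0 : Int) ≤ PySem.Chars.findFrom cs ['\''] (k : Int) := by omega
            have hjk1 : k + 1 ≤ (PySem.Chars.findFrom cs ['\''] (k : Int)).toNat := by
              rcases Nat.lt_or_ge k (PySem.Chars.findFrom cs ['\''] (k : Int)).toNat with h | h
              · omega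
              · exfalso
                have hkk : (PySem.Chars.findFrom cs ['\''] (k : Int)).toNat = k := by omega
                exact hnpre (hkk ▸ hpre)
            obtain ⟨hjlen, hjq⟩ := (pv_singleton_prefix_drop cs '\'' _).mp hpre
            have hmem : ('\'' : Char) ∈ cs.drop (k + 1) := by
              have hlen : (PySem.Chars.findFrom cs ['\''] (k : Int)).toNat - (k + 1)
                  < (cs.drop (k + 1)).length := by
                simp only [List.length_drop]; omega
              have hcell : (cs.drop (k + 1))[(PySem.Chars.findFrom cs ['\''] (k : Int)).toNat - (k + 1)]
                  = cs[(PySem.Chars.findFrom cs ['\''] (k : Int)).toNat] := by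
                rw [List.getElem_drop]
                congr 1
                omega
              rw [← hjq, ← hcell]
              exact List.getElem_mem hlen
            have hj'ne : PySem.Chars.findFrom cs ['\''] ((k : Int) + 1) ≠ -1 := by
              intro h
              exact ((hchar'.1).mp h) hmem
            obtain ⟨hle', hpre', hmin'⟩ := hchar'.2 hj'ne
            have hj'0 : (0 : Int) ≤ PySem.Chars.findFrom cs ['\''] ((k : Int) + 1) := by omega
            have h1 : ¬ (PySem.Chars.findFrom cs ['\''] (k : Int)).toNat
                < (PySem.Chars.findFrom cs ['\''] ((k : Int) + 1)).toNat :=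
              fun hc => hmin' _ hjk1 hc hpre
            have h2 : ¬ (PySem.Chars.findFrom cs ['\''] ((k : Int) + 1)).toNat
                < (PySem.Chars.findFrom cs ['\''] (k : Int)).toNat :=
              fun hc => hmin _ (by omega) hc hpre'
            omega
        rw [pvBLoop_eq cs ((k : Int) + 1), pvBLoop_eq cs (k : Int), hjj]
    · rw [pvALoop, dif_neg hlt, pvBLoop_eq,
        if_pos (pv_findFrom_ge_len cs '\'' i (by omega))]

-- ===== VERDICT (by name: the statement is the Claim_ definition above) =====
theorem skip_single_quoted_literal_py_spec : Claim_equal_skip_single_quoted_literal_py := by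
  intro sql start _hdom hpre
  unfold Pre_skip_single_quoted_literal_py at hpre
  unfold Spec_skip_single_quoted_literal_py
  unfold skip_single_quoted_literal_py skip_single_quoted_literal_py_alt
  exact pv_AB sql.toList ((sql.toList.length : Int) - (start + 1)).toNat (start + 1) le_rfl hpre
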